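-- pv_equiv track=rewrite | github.com/shrenik007/metaheuristic-optimization | SD_R00183334_Assignment2/utils.py | get_variable_clauses_mapping
-- ===== SOURCE A (Python) =====
-- def get_variable_clauses_mapping(clauses_dict):
--     """
--     This function returns the mapping of all the clauses involved with any variable
--     """
--     variable_clause_dict = {}
--     variable_clause_dict_full = {}
--     for key, value in clauses_dict.items():
--         for val in value:
--             if val not in variable_clause_dict:
--                 variable_clause_dict[val] = []
--                 variable_clause_dict[-val] = []
--                 variable_clause_dict_full[val] = {}
--                 variable_clause_dict_full[-val] = {}
--             variable_clause_dict[val].append(key)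
--             variable_clause_dict_full[val][key] = clauses_dict[key]
--     return variable_clause_dict, variable_clause_dict_full
-- ===== SOURCE B (Python) =====
-- def get_variable_clauses_mapping(clauses_dict):
--     """
--     This function returns the mapping of all the clauses involved with any variable
--     """
--     variable_clause_dict = {}
--     for key, value in clauses_dict.items():
--         for val in value:
--             if val not in variable_clause_dict:
--                 variable_clause_dict[val] = []
--                 variable_clause_dict[-val] = []
--             variable_clause_dict[val].append(key)
--     variable_clause_dict_full = {
--         lit: {k: clauses_dict[k] for k in keys}
--         for lit, keys in variable_clause_dict.items()
--     }
--     return variable_clause_dict, variable_clause_dict_full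
-- ===== Notes on version B (the rewrite author's own statement) =====
-- stated objective: simpler
-- what changed: The inline dual-dict maintenance is split into two passes: one loop builds only the variable->clause-keys grouping, then the full mapping is derived from that grouping by a dict comprehension, instead of threading both dicts through the inner loop.
import Mathlib
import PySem

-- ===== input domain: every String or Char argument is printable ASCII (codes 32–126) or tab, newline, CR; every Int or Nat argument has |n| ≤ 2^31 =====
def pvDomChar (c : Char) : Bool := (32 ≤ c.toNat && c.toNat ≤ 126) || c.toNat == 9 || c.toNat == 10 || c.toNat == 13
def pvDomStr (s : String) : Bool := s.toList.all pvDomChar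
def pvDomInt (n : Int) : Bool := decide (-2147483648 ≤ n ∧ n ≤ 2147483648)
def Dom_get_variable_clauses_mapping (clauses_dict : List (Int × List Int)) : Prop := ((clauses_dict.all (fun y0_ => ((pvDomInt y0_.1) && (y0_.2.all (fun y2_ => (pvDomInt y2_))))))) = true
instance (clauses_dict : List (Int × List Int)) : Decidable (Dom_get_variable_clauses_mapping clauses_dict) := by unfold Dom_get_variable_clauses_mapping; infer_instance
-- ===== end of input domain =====

-- B separates the work into two passes (build the grouping dict, then derive the full dict
-- from it by a comprehension) instead of threading both dicts through the inner loop.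

-- ===== PORT A =====
-- inner-loop body of A: one literal `v` of the clause `key`
def pvAstep (clauses_dict : List (Int × List Int)) (key : Int)
    (st : PySem.Dict Int (List Int) × PySem.Dict Int (PySem.Dict Int (List Int))) (v : Int) :
    PySem.Dict Int (List Int) × PySem.Dict Int (PySem.Dict Int (List Int)) :=
  let st' := if st.1.contains v then st
    else ((st.1.insert v []).insert (-v) [],
          (st.2.insert v PySem.Dict.empty).insert (-v) PySem.Dict.empty)
  -- `variable_clause_dict[val].append(key)` / `variable_clause_dict_full[val][key] = clauses_dict[key]`
  -- (`clauses_dict[key]` never raises: `key` comes from `clauses_dict.items()`, so getD's default is dead)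
  (st'.1.insert v (st'.1.getD v [] ++ [key]),
   st'.2.insert v ((st'.2.getD v PySem.Dict.empty).insert key ((PySem.Dict.mk clauses_dict).getD key [])))

def get_variable_clauses_mapping (clauses_dict : List (Int × List Int)) :
    (List (Int × List Int)) × (List (Int × List (Int × List Int))) :=
  let r := clauses_dict.foldl
    (fun st kv => kv.2.foldl (pvAstep clauses_dict kv.1) st)
    (PySem.Dict.empty, PySem.Dict.empty)
  (r.1.items, r.2.items.map (fun p => (p.1, p.2.items)))

-- ===== PORT B =====
-- phase-1 inner-loop body of B: only the grouping dict is maintained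
def pvBstep (key : Int) (d : PySem.Dict Int (List Int)) (v : Int) : PySem.Dict Int (List Int) :=
  let d' := if d.contains v then d else (d.insert v []).insert (-v) []
  d'.insert v (d'.getD v [] ++ [key])

-- phase-2: the dict comprehension `{k: clauses_dict[k] for k in keys}`
def pvComp (clauses_dict : List (Int × List Int)) (ks : List Int) : PySem.Dict Int (List Int) :=
  ks.foldl (fun m k => m.insert k ((PySem.Dict.mk clauses_dict).getD k [])) PySem.Dict.empty

def get_variable_clauses_mapping_alt (clauses_dict : List (Int × List Int)) :
    (List (Int × List Int)) × (List (Int × List (Int × List Int))) :=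
  let d1 := clauses_dict.foldl (fun d kv => kv.2.foldl (pvBstep kv.1) d) PySem.Dict.empty
  (d1.items, d1.items.map (fun p => (p.1, (pvComp clauses_dict p.2).items)))

-- ===== PRECONDITION & SPEC =====
def Spec_get_variable_clauses_mapping (clauses_dict : List (Int × List Int)) (out : (List (Int × List Int)) × (List (Int × List (Int × List Int)))) : Prop := out = get_variable_clauses_mapping_alt clauses_dict
instance (clauses_dict : List (Int × List Int)) (out : (List (Int × List Int)) × (List (Int × List (Int × List Int)))) : Decidable (Spec_get_variable_clauses_mapping clauses_dict out) := by unfold Spec_get_variable_clauses_mapping; infer_instance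

-- ===== CLAIM (what is proved, stated in full; the proofs are below) =====
def Claim_equal_get_variable_clauses_mapping : Prop := ∀ (clauses_dict : List (Int × List Int)), Dom_get_variable_clauses_mapping clauses_dict → Spec_get_variable_clauses_mapping clauses_dict (get_variable_clauses_mapping clauses_dict)

-- ===== LEMMAS AND PROOFS =====

-- `pvF cd d` is the full dict A maintains, expressed as B derives it from the grouping dict `d`
def pvF (cd : List (Int × List Int)) (d : PySem.Dict Int (List Int)) :
    PySem.Dict Int (PySem.Dict Int (List Int)) :=
  PySem.Dict.mk (d.items.map (fun p => (p.1, pvComp cd p.2)))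

lemma pvF_get? (cd : List (Int × List Int)) (d : PySem.Dict Int (List Int)) (v : Int) :
    (pvF cd d).get? v = (d.get? v).map (pvComp cd) := by
  obtain ⟨l⟩ := d
  induction l with
  | nil => rfl
  | cons p rest ih =>
      show (PySem.Dict.mk ((p.1, pvComp cd p.2) :: rest.map (fun p => (p.1, pvComp cd p.2)))).get? v = _
      rw [PySem.Dict.get?_mk_cons, PySem.Dict.get?_mk_cons]
      by_cases h : (p.1 == v) = true <;> simp [h, ← ih, pvF]

lemma pvF_contains (cd : List (Int × List Int)) (d : PySem.Dict Int (List Int)) (v : Int) :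
    (pvF cd d).contains v = d.contains v := by
  rw [PySem.Dict.contains_eq_isSome_get?, PySem.Dict.contains_eq_isSome_get?, pvF_get?]
  cases d.get? v <;> rfl

lemma pvF_getD (cd : List (Int × List Int)) (d : PySem.Dict Int (List Int)) (v : Int) :
    (pvF cd d).getD v PySem.Dict.empty = pvComp cd (d.getD v []) := by
  rw [PySem.Dict.getD_eq_get?_getD, PySem.Dict.getD_eq_get?_getD, pvF_get?]
  cases d.get? v <;> rfl

lemma pvF_insert (cd : List (Int × List Int)) (d : PySem.Dict Int (List Int)) (k : Int) (xs : List Int) :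
    pvF cd (d.insert k xs) = (pvF cd d).insert k (pvComp cd xs) := by
  apply PySem.Dict.ext
  show (d.insert k xs).items.map (fun p => (p.1, pvComp cd p.2)) = ((pvF cd d).insert k (pvComp cd xs)).items
  rw [PySem.Dict.items_insert, PySem.Dict.items_insert, pvF_contains]
  have hFitems : (pvF cd d).items = d.items.map (fun p => (p.1, pvComp cd p.2)) := rfl
  rw [hFitems]
  by_cases h : d.contains k = true
  · simp only [h, if_true, List.map_map]
    apply List.map_congr_left
    intro p _
    by_cases hp : p.1 = k <;> simp [Function.comp, hp]
  · simp only [Bool.not_eq_true] at h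
    simp [h]

lemma pvComp_append_singleton (cd : List (Int × List Int)) (ks : List Int) (k : Int) :
    pvComp cd (ks ++ [k]) = (pvComp cd ks).insert k ((PySem.Dict.mk cd).getD k []) := by
  simp [pvComp, List.foldl_append]

-- one inner step preserves "second component = pvF of the first"
lemma pvStep_pair (cd : List (Int × List Int)) (key v : Int) (d : PySem.Dict Int (List Int)) :
    pvAstep cd key (d, pvF cd d) v = (pvBstep key d v, pvF cd (pvBstep key d v)) := by
  unfold pvAstep pvBstep
  by_cases h : d.contains v = true
  · simp only [h, if_true]
    rw [pvF_getD, ← pvComp_append_singleton, ← pvF_insert]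
  · simp only [Bool.not_eq_true] at h
    simp only [h, Bool.false_eq_true, if_false]
    have e1 : pvF cd ((d.insert v []).insert (-v) []) =
        ((pvF cd d).insert v PySem.Dict.empty).insert (-v) PySem.Dict.empty := by
      rw [pvF_insert, pvF_insert]; rfl
    rw [← e1, pvF_getD, ← pvComp_append_singleton, ← pvF_insert]

lemma pvInner_pair (cd : List (Int × List Int)) (key : Int) (vs : List Int)
    (d : PySem.Dict Int (List Int)) :
    vs.foldl (pvAstep cd key) (d, pvF cd d) =
      (vs.foldl (pvBstep key) d, pvF cd (vs.foldl (pvBstep key) d)) := by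
  induction vs generalizing d with
  | nil => rfl
  | cons v rest ih => rw [List.foldl_cons, List.foldl_cons, pvStep_pair, ih]

lemma pvOuter_pair (cd l : List (Int × List Int)) (d : PySem.Dict Int (List Int)) :
    l.foldl (fun st kv => kv.2.foldl (pvAstep cd kv.1) st) (d, pvF cd d) =
      (l.foldl (fun d kv => kv.2.foldl (pvBstep kv.1) d) d,
       pvF cd (l.foldl (fun d kv => kv.2.foldl (pvBstep kv.1) d) d)) := by
  induction l generalizing d with
  | nil => rfl
  | cons kv rest ih => rw [List.foldl_cons, List.foldl_cons, pvInner_pair, ih]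

-- ===== VERDICT (by name: the statement is the Claim_ definition above) =====
theorem get_variable_clauses_mapping_spec : Claim_equal_get_variable_clauses_mapping := by
  intro cd _
  show get_variable_clauses_mapping cd = get_variable_clauses_mapping_alt cd
  unfold get_variable_clauses_mapping get_variable_clauses_mapping_alt
  have h0 : (PySem.Dict.empty : PySem.Dict Int (PySem.Dict Int (List Int))) =
      pvF cd PySem.Dict.empty := rfl
  rw [h0, pvOuter_pair]
  simp [pvF, List.map_map, Function.comp]
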